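-- pv_equiv track=rewrite | github.com/adrianlee1005/language-modeling-predictor | hw6_language.py | cleanBookData
-- ===== SOURCE A (Python) =====
-- import string
--
-- def separateWords(line):
--     list4=[]
--     nospace = ""
--     for hairband in line:
--         if hairband in string.punctuation and hairband != "'":
--             if nospace:
--                 list4.append(nospace)
--             list4.append(hairband)
--             nospace = ""
--         elif hairband == " ":
--             if nospace:
--                 list4.append(nospace)
--                 nospace = ""
--         else:
--             nospace += hairband
--     if nospace:
--         list4.append(nospace)
--     return list4
--
-- def cleanBookData(text):
--     insert=[]
--     for anything in text.splitlines():
--         finish=[]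
--         function = separateWords(anything)
--         for anything2 in function:
--             finish.append(anything2)
--             if anything2[-1] in ".!?":
--                 insert.append(" ".join(finish))
--                 finish=[]
--         if finish:
--             insert.append(" ".join(finish))
--     return "\n".join(insert).lower()
-- ===== SOURCE B (Python) =====
-- import string
--
-- _SEPS = set(string.punctuation) - {"'"}
--
--
-- def cleanBookData(text):
--     lines = []
--     for raw in text.splitlines():
--         padded = "".join(" " + ch + " " if ch in _SEPS else ch for ch in raw)
--         tokens = [t for t in padded.split(" ") if t]
--         cur = ""
--         for t in tokens:
--             cur = cur + " " + t if cur else t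
--             if t in (".", "!", "?"):
--                 lines.append(cur)
--                 cur = ""
--         if cur:
--             lines.append(cur)
--     return "\n".join(lines).lower()
-- ===== Notes on version B (the rewrite author's own statement) =====
-- stated objective: simpler
-- what changed: Replaces the character-by-character tokenizer state machine by space-padding each separating punctuation character and splitting the line on the space character (dropping empty pieces), and groups tokens into sentences with a string accumulator that is flushed at sentence-ending punctuation tokens instead of a token-list buffer tested on its last character.
import Mathlib
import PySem

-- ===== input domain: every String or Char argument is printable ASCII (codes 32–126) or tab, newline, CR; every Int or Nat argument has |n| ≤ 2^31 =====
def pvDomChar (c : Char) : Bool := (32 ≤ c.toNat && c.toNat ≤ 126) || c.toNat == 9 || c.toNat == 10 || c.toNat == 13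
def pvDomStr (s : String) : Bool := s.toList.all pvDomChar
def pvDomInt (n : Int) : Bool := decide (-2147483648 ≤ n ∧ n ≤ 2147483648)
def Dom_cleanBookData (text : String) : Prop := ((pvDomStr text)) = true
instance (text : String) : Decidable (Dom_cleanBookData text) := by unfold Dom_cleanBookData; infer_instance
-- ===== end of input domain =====

-- B replaces A's character-by-character tokenizer FSM by space-padding the separating
-- punctuation and splitting on spaces, and groups sentences with a string accumulator
-- instead of a token-list buffer; objective: simpler, same return value.

-- ===== PORT A =====
-- string.punctuation
def pvPunct : List Char := "!\"#$%&'()*+,-./:;<=>?@[\\]^_`{|}~".toList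

-- one step of the FSM loop body of separateWords (tokens kept as List Char)
def sepStep (st : List (List Char) × List Char) (c : Char) : List (List Char) × List Char :=
  if c ∈ pvPunct ∧ c ≠ '\'' then
    ((if st.2 ≠ [] then st.1 ++ [st.2] else st.1) ++ [[c]], [])
  else if c = ' ' then
    ((if st.2 ≠ [] then st.1 ++ [st.2] else st.1), [])
  else (st.1, st.2 ++ [c])

def separateWords (line : List Char) : List (List Char) :=
  let st := line.foldl sepStep ([], [])
  if st.2 ≠ [] then st.1 ++ [st.2] else st.1

def cleanBookData (text : String) : String :=
  let insert := (PySem.Chars.splitlines text.toList).foldl (fun insert line =>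
    let st := (separateWords line).foldl
      (fun (st : List (List Char) × List (List Char)) tk =>
        let finish := st.2 ++ [tk]
        -- anything2[-1] in ".!?" (tokens are never empty, so the none branch is dead)
        if (PySem.List.pyGet? tk (-1)).elim false (fun c => decide (c ∈ ['.', '!', '?'])) then
          (st.1 ++ [PySem.Chars.join [' '] finish], [])
        else (st.1, finish)) (insert, [])
    if st.2 ≠ [] then st.1 ++ [PySem.Chars.join [' '] st.2] else st.1) []
  String.ofList (PySem.Chars.lower (PySem.Chars.join ['\n'] insert))

-- ===== PORT B =====
-- _SEPS = set(string.punctuation) - {"'"}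
def pvSeps : PySem.Set Char := (PySem.Set.ofList pvPunct).diff (PySem.Set.ofList ['\''])

def cleanBookData_alt (text : String) : String :=
  let lines := (PySem.Chars.splitlines text.toList).foldl (fun acc raw =>
    let padded := raw.flatMap (fun ch => if ch ∈ pvSeps then [' ', ch, ' '] else [ch])
    let toks := (PySem.Chars.splitOn padded [' ']).filter (· ≠ [])
    let st := toks.foldl
      (fun (st : List (List Char) × List Char) t =>
        let cur := if st.2 ≠ [] then st.2 ++ ' ' :: t else t
        if t = ['.'] ∨ t = ['!'] ∨ t = ['?'] then (st.1 ++ [cur], [])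
        else (st.1, cur)) (acc, [])
    if st.2 ≠ [] then st.1 ++ [st.2] else st.1) []
  String.ofList (PySem.Chars.lower (PySem.Chars.join ['\n'] lines))

-- ===== PRECONDITION & SPEC =====
def Spec_cleanBookData (text : String) (out : String) : Prop := out = cleanBookData_alt text
instance (text : String) (out : String) : Decidable (Spec_cleanBookData text out) := by unfold Spec_cleanBookData; infer_instance

-- ===== CLAIM (what is proved, stated in full; the proofs are below) =====
def Claim_equal_cleanBookData : Prop := ∀ (text : String), Dom_cleanBookData text → Spec_cleanBookData text (cleanBookData text)

-- ===== LEMMAS AND PROOFS =====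

-- split a char list at every single space (the shape of Python's str.split(" "))
def splitSp : List Char → List (List Char)
  | [] => [[]]
  | c :: rest =>
    if c = ' ' then [] :: splitSp rest
    else
      match splitSp rest with
      | h :: t => (c :: h) :: t
      | [] => [[c]]

theorem splitSp_ne_nil (l : List Char) : splitSp l ≠ [] := by
  cases l with
  | nil => simp [splitSp]
  | cons c rest =>
    simp only [splitSp]
    split_ifs
    · simp
    · cases h : splitSp rest <;> simp

theorem splitOn_go_eq (fuel : Nat) (l cur : List Char) (acc : List (List Char))
    (h : l.length < fuel) :
    PySem.Chars.splitOn.go [' '] fuel l cur acc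
      = acc.reverse ++ List.modifyHead (cur.reverse ++ ·) (splitSp l) := by
  induction fuel generalizing l cur acc with
  | zero => omega
  | succ f ih =>
    cases l with
    | nil => simp [PySem.Chars.splitOn.go, splitSp, List.modifyHead]
    | cons c rest =>
      have hgo : PySem.Chars.splitOn.go [' '] (f+1) (c :: rest) cur acc
          = if ' ' = c then PySem.Chars.splitOn.go [' '] f rest [] (cur.reverse :: acc)
            else PySem.Chars.splitOn.go [' '] f rest (c :: cur) acc := by
        simp [PySem.Chars.splitOn.go, List.isPrefixOf]
      by_cases hc : c = ' '
      · subst hc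
        rw [hgo, if_pos rfl,
          ih rest [] (cur.reverse :: acc) (by simpa using Nat.lt_of_succ_lt_succ h)]
        cases hs : splitSp rest <;> simp [splitSp, List.modifyHead, hs]
      · rw [hgo, if_neg (fun h => hc h.symm),
          ih rest (c :: cur) acc (by simpa using Nat.lt_of_succ_lt_succ h)]
        simp only [splitSp, if_neg hc]
        cases hs : splitSp rest with
        | nil => exact absurd hs (splitSp_ne_nil rest)
        | cons hh tt => simp

theorem splitOn_eq_splitSp (l : List Char) :
    PySem.Chars.splitOn l [' '] = splitSp l := by
  rw [PySem.Chars.splitOn, splitOn_go_eq (l.length + 1) l [] [] (by omega)]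
  cases hs : splitSp l with
  | nil => exact absurd hs (splitSp_ne_nil l)
  | cons hh tt => simp [List.modifyHead]

theorem splitSp_space (rest : List Char) : splitSp (' ' :: rest) = [] :: splitSp rest := by
  simp [splitSp]

theorem splitSp_nonspace (c : Char) (rest : List Char) (h : c ≠ ' ') :
    splitSp (c :: rest)
      = match splitSp rest with
        | hh :: t => (c :: hh) :: t
        | [] => [[c]] := by
  simp [splitSp, h]

theorem modifyHead_id (l : List (List Char)) :
    List.modifyHead (fun x : List Char => x) l = l := by
  cases l <;> simp [List.modifyHead]

-- the separating-character predicate shared by both ports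
def sepc (c : Char) : Prop := c ∈ pvPunct ∧ c ≠ '\''

theorem mem_pvSeps (c : Char) : c ∈ pvSeps ↔ sepc c := by
  unfold pvSeps sepc
  rw [PySem.Set.mem_diff]
  simp [PySem.Set.mem_ofList]

-- B's padding of a line
def expandL (l : List Char) : List Char :=
  l.flatMap (fun ch => if ch ∈ pvSeps then [' ', ch, ' '] else [ch])

theorem sepStep_sep {c : Char} (h : sepc c) (st : List (List Char) × List Char) :
    sepStep st c = ((if st.2 ≠ [] then st.1 ++ [st.2] else st.1) ++ [[c]], []) := by
  unfold sepStep
  rw [if_pos ⟨h.1, h.2⟩]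

theorem sepStep_space (st : List (List Char) × List Char) :
    sepStep st ' ' = ((if st.2 ≠ [] then st.1 ++ [st.2] else st.1), []) := by
  unfold sepStep
  rw [if_neg (by decide), if_pos rfl]

theorem sepStep_word {c : Char} (h1 : ¬ sepc c) (h2 : c ≠ ' ')
    (st : List (List Char) × List Char) : sepStep st c = (st.1, st.2 ++ [c]) := by
  unfold sepStep
  rw [if_neg (fun hx => h1 ⟨hx.1, hx.2⟩), if_neg h2]

-- finalize the FSM state
def finTok (st : List (List Char) × List Char) : List (List Char) :=
  if st.2 ≠ [] then st.1 ++ [st.2] else st.1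

-- the FSM of A equals filter-nonempty of the space-split of B's padded line
theorem fsm_eq (cs : List Char) : ∀ (acc : List (List Char)) (cur : List Char),
    finTok (cs.foldl sepStep (acc, cur))
      = acc ++ (List.modifyHead (cur ++ ·) (splitSp (expandL cs))).filter (· ≠ []) := by
  induction cs with
  | nil =>
    intro acc cur
    by_cases h : cur = [] <;> simp [finTok, expandL, splitSp, h]
  | cons c rest ih =>
    intro acc cur
    have hexp : expandL (c :: rest)
        = (if c ∈ pvSeps then [' ', c, ' '] else [c]) ++ expandL rest := by
      simp [expandL]
    by_cases hs : sepc c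
    · have hmem : c ∈ pvSeps := (mem_pvSeps c).mpr hs
      have h1 : (c :: rest).foldl sepStep (acc, cur)
          = rest.foldl sepStep ((if cur ≠ [] then acc ++ [cur] else acc) ++ [[c]], []) := by
        rw [List.foldl_cons, sepStep_sep hs]
      rw [h1, ih]
      have hcsp : c ≠ ' ' := by
        intro h; rw [h] at hs
        exact (by decide : ¬ (' ' ∈ pvPunct ∧ ' ' ≠ '\'')) ⟨hs.1, hs.2⟩
      have h2 : splitSp (expandL (c :: rest)) = [] :: [c] :: splitSp (expandL rest) := by
        rw [hexp, if_pos hmem]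
        show splitSp (' ' :: c :: ' ' :: expandL rest) = _
        rw [splitSp_space, splitSp_nonspace c _ hcsp, splitSp_space]
      rw [h2]
      by_cases hcur : cur = [] <;> simp [hcur, modifyHead_id]
    · have hnmem : c ∉ pvSeps := fun h => hs ((mem_pvSeps c).mp h)
      by_cases hsp : c = ' '
      · subst hsp
        have h1 : (' ' :: rest).foldl sepStep (acc, cur)
            = rest.foldl sepStep (if cur ≠ [] then acc ++ [cur] else acc, []) := by
          rw [List.foldl_cons, sepStep_space]
        rw [h1, ih]
        have h2 : splitSp (expandL (' ' :: rest)) = [] :: splitSp (expandL rest) := by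
          rw [hexp, if_neg hnmem]
          exact splitSp_space _
        rw [h2]
        by_cases hcur : cur = [] <;> simp [hcur, modifyHead_id]
      · have h1 : (c :: rest).foldl sepStep (acc, cur)
            = rest.foldl sepStep (acc, cur ++ [c]) := by
          rw [List.foldl_cons, sepStep_word hs hsp]
        rw [h1, ih]
        have h2 : splitSp (expandL (c :: rest))
            = match splitSp (expandL rest) with
              | hh :: t => (c :: hh) :: t
              | [] => [[c]] := by
          rw [hexp, if_neg hnmem]
          exact splitSp_nonspace c _ hsp
        cases hsplit : splitSp (expandL rest) with
        | nil => exact absurd hsplit (splitSp_ne_nil _)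
        | cons hh tt =>
          rw [h2, hsplit]
          simp

-- separateWords = B's tokens
theorem separateWords_eq_toks (line : List Char) :
    separateWords line
      = (PySem.Chars.splitOn (expandL line) [' ']).filter (· ≠ []) := by
  rw [splitOn_eq_splitSp]
  have := fsm_eq line [] []
  simpa [separateWords, finTok, modifyHead_id] using this

-- every token of separateWords is nonempty and is a singleton or a word
def goodTok (t : List Char) : Prop :=
  t ≠ [] ∧ ((∃ c, t = [c]) ∨ ∀ c ∈ t, ¬ sepc c ∧ c ≠ ' ')

theorem fsm_good (cs : List Char) : ∀ (acc : List (List Char)) (cur : List Char),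
    (∀ t ∈ acc, goodTok t) → (∀ c ∈ cur, ¬ sepc c ∧ c ≠ ' ') →
    ∀ t ∈ finTok (cs.foldl sepStep (acc, cur)), goodTok t := by
  induction cs with
  | nil =>
    intro acc cur hacc hcur t ht
    unfold finTok at ht
    split_ifs at ht with h
    · rcases List.mem_append.mp ht with h1 | h1
      · exact hacc t h1
      · simp at h1; subst h1; exact ⟨h, Or.inr hcur⟩
    · exact hacc t ht
  | cons c rest ih =>
    intro acc cur hacc hcur
    by_cases hs : sepc c
    · have h1 : (c :: rest).foldl sepStep (acc, cur)
          = rest.foldl sepStep ((if cur ≠ [] then acc ++ [cur] else acc) ++ [[c]], []) := by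
        rw [List.foldl_cons, sepStep_sep hs]
      rw [h1]
      refine ih _ [] ?_ (by simp)
      intro t ht
      rcases List.mem_append.mp ht with h2 | h2
      · split_ifs at h2 with h3
        · rcases List.mem_append.mp h2 with h4 | h4
          · exact hacc t h4
          · simp at h4; subst h4; exact ⟨h3, Or.inr hcur⟩
        · exact hacc t h2
      · simp at h2; subst h2; exact ⟨by simp, Or.inl ⟨c, rfl⟩⟩
    · by_cases hsp : c = ' '
      · subst hsp
        have h1 : (' '  :: rest).foldl sepStep (acc, cur)
            = rest.foldl sepStep (if cur ≠ [] then acc ++ [cur] else acc, []) := by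
          rw [List.foldl_cons, sepStep_space]
        rw [h1]
        refine ih _ [] ?_ (by simp)
        intro t ht
        split_ifs at ht with h3
        · rcases List.mem_append.mp ht with h4 | h4
          · exact hacc t h4
          · simp at h4; subst h4; exact ⟨h3, Or.inr hcur⟩
        · exact hacc t ht
      · have h1 : (c :: rest).foldl sepStep (acc, cur)
            = rest.foldl sepStep (acc, cur ++ [c]) := by
          rw [List.foldl_cons, sepStep_word hs hsp]
        rw [h1]
        refine ih _ _ hacc ?_
        intro d hd
        rcases List.mem_append.mp hd with h2 | h2
        · exact hcur d h2
        · simp at h2; subst h2; exact ⟨hs, hsp⟩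

-- A's last-char test agrees with B's whole-token test on good tokens
theorem pyGet_neg_one (l : List Char) (c : Char) :
    PySem.List.pyGet? (l ++ [c]) (-1) = some c := by
  simp [PySem.List.pyGet?, PySem.List.pyIdx?]

theorem cond_eq (t : List Char) (h : goodTok t) :
    ((PySem.List.pyGet? t (-1)).elim false (fun c => decide (c ∈ ['.', '!', '?'])) = true)
      ↔ (t = ['.'] ∨ t = ['!'] ∨ t = ['?']) := by
  obtain ⟨hne, hshape⟩ := h
  rcases hshape with ⟨c, rfl⟩ | hword
  · have hget : PySem.List.pyGet? [c] (-1) = some c := pyGet_neg_one [] c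
    rw [hget]
    constructor
    · intro hc
      simp at hc
      rcases hc with rfl | rfl | rfl <;> simp
    · rintro (h | h | h) <;> (injection h with h1 _; subst h1; decide)
  · obtain ⟨rest, c, rfl⟩ : ∃ rest c, t = rest ++ [c] := by
      rcases List.eq_nil_or_concat t with h | ⟨L, b, hL⟩
      · exact absurd h hne
      · exact ⟨L, b, by simpa [List.concat_eq_append] using hL⟩
    have hc := hword c (by simp)
    have hcn : ¬ (c = '.' ∨ c = '!' ∨ c = '?') := by
      rintro (rfl | rfl | rfl) <;> exact hc.1 ⟨by decide, by decide⟩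
    rw [pyGet_neg_one]
    constructor
    · intro hcond
      simp at hcond
      exact (hcn hcond).elim
    · rintro (h | h | h) <;>
        (exfalso;
         have hlen := congrArg List.length h;
         simp at hlen;
         subst hlen;
         simp at h; subst h;
         exact hcn (by simp))

-- " ".join: appending one more token
theorem join_append_one (finish : List (List Char)) (t : List Char) :
    PySem.Chars.join [' '] (finish ++ [t])
      = if finish = [] then t else PySem.Chars.join [' '] finish ++ ' ' :: t := by
  induction finish with
  | nil => simp [PySem.Chars.join_singleton]
  | cons x xs ih =>
    cases xs with
    | nil => simp [PySem.Chars.join_cons_cons, PySem.Chars.join_singleton]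
    | cons y ys =>
      have h1 : ((x :: y :: ys) ++ [t]) = x :: (y :: (ys ++ [t])) := by simp
      rw [h1, PySem.Chars.join_cons_cons]
      have h2 : PySem.Chars.join [' '] (y :: (ys ++ [t]))
          = PySem.Chars.join [' '] ((y :: ys) ++ [t]) := by simp
      rw [h2, ih]
      simp [PySem.Chars.join_cons_cons]

theorem join_ne_nil (finish : List (List Char)) (hne : finish ≠ [])
    (hts : ∀ t ∈ finish, t ≠ []) : PySem.Chars.join [' '] finish ≠ [] := by
  cases finish with
  | nil => exact absurd rfl hne
  | cons x xs =>
    cases xs with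
    | nil =>
      rw [PySem.Chars.join_singleton]
      exact hts x (by simp)
    | cons y ys =>
      rw [PySem.Chars.join_cons_cons]
      have := hts x (by simp)
      intro h
      rcases List.append_eq_nil_iff.mp h with ⟨h1, _⟩
      rcases List.append_eq_nil_iff.mp h1 with ⟨h2, _⟩
      exact this h2

-- the two sentence-grouping loops agree
theorem group_eq (toks : List (List Char)) :
    ∀ (insert : List (List Char)) (finish : List (List Char)) (cur : List Char),
    (∀ t ∈ toks, goodTok t) → (∀ t ∈ finish, t ≠ []) →
    cur = PySem.Chars.join [' '] finish →
    (let stA := toks.foldl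
        (fun (st : List (List Char) × List (List Char)) tk =>
          let finish := st.2 ++ [tk]
          if (PySem.List.pyGet? tk (-1)).elim false (fun c => decide (c ∈ ['.', '!', '?'])) then
            (st.1 ++ [PySem.Chars.join [' '] finish], [])
          else (st.1, finish)) (insert, finish)
     if stA.2 ≠ [] then stA.1 ++ [PySem.Chars.join [' '] stA.2] else stA.1)
      = (let stB := toks.foldl
          (fun (st : List (List Char) × List Char) t =>
            let cur := if st.2 ≠ [] then st.2 ++ ' ' :: t else t
            if t = ['.'] ∨ t = ['!'] ∨ t = ['?'] then (st.1 ++ [cur], [])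
            else (st.1, cur)) (insert, cur)
         if stB.2 ≠ [] then stB.1 ++ [stB.2] else stB.1) := by
  induction toks with
  | nil =>
    intro insert finish cur hg hts hcur
    subst hcur
    by_cases h : finish = []
    · subst h
      simp [PySem.Chars.join_nil]
    · have hne' := join_ne_nil finish h hts
      simp [h, hne']
  | cons t toks ih =>
    intro insert finish cur hg hts hcur
    subst hcur
    have hgt := hg t (by simp)
    have hcond := cond_eq t hgt
    have hjoin : PySem.Chars.join [' '] (finish ++ [t])
        = (if PySem.Chars.join [' '] finish ≠ [] then PySem.Chars.join [' '] finish ++ ' ' :: t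
           else t) := by
      rw [join_append_one]
      by_cases h : finish = []
      · subst h
        simp [PySem.Chars.join_nil]
      · have hne' := join_ne_nil finish h hts
        simp [h, hne']
    simp only [List.foldl_cons]
    by_cases hcut : t = ['.'] ∨ t = ['!'] ∨ t = ['?']
    · rw [if_pos (hcond.mpr hcut), if_pos hcut]
      simp only [hjoin]
      exact ih _ [] [] (fun u hu => hg u (by simp [hu])) (by simp)
        (by simp [PySem.Chars.join_nil])
    · rw [if_neg (fun h => hcut (hcond.mp h)), if_neg hcut]
      refine ih _ (finish ++ [t]) _ (fun u hu => hg u (by simp [hu])) ?_ hjoin.symm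
      intro u hu
      rcases List.mem_append.mp hu with h1 | h1
      · exact hts u h1
      · simp at h1; subst h1; exact hgt.1

-- ===== VERDICT (by name: the statement is the Claim_ definition above) =====
theorem cleanBookData_spec : Claim_equal_cleanBookData := by
  intro text _
  unfold Spec_cleanBookData cleanBookData cleanBookData_alt
  have hline : ∀ (insert : List (List Char)) (line : List Char),
      (let st := (separateWords line).foldl
        (fun (st : List (List Char) × List (List Char)) tk =>
          let finish := st.2 ++ [tk]
          if (PySem.List.pyGet? tk (-1)).elim false (fun c => decide (c ∈ ['.', '!', '?'])) then
            (st.1 ++ [PySem.Chars.join [' '] finish], [])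
          else (st.1, finish)) (insert, [])
       if st.2 ≠ [] then st.1 ++ [PySem.Chars.join [' '] st.2] else st.1)
      = (let padded := line.flatMap (fun ch => if ch ∈ pvSeps then [' ', ch, ' '] else [ch])
         let toks := (PySem.Chars.splitOn padded [' ']).filter (· ≠ [])
         let st := toks.foldl
          (fun (st : List (List Char) × List Char) t =>
            let cur := if st.2 ≠ [] then st.2 ++ ' ' :: t else t
            if t = ['.'] ∨ t = ['!'] ∨ t = ['?'] then (st.1 ++ [cur], [])
            else (st.1, cur)) (insert, [])
         if st.2 ≠ [] then st.1 ++ [st.2] else st.1) := by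
    intro insert line
    have htoks : (PySem.Chars.splitOn
        (line.flatMap (fun ch => if ch ∈ pvSeps then [' ', ch, ' '] else [ch])) [' ']).filter (· ≠ [])
        = separateWords line := by
      exact (separateWords_eq_toks line).symm
    simp only [htoks]
    have hgood : ∀ t ∈ separateWords line, goodTok t := by
      intro t ht
      have := fsm_good line [] [] (by simp) (by simp)
      exact this t (by simpa [separateWords, finTok] using ht)
    exact group_eq (separateWords line) insert [] [] hgood (by simp)
      (by simp [PySem.Chars.join_nil])
  have hfold : ∀ (lines : List (List Char)) (init : List (List Char)),
      lines.foldl (fun insert line =>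
        let st := (separateWords line).foldl
          (fun (st : List (List Char) × List (List Char)) tk =>
            let finish := st.2 ++ [tk]
            if (PySem.List.pyGet? tk (-1)).elim false (fun c => decide (c ∈ ['.', '!', '?'])) then
              (st.1 ++ [PySem.Chars.join [' '] finish], [])
            else (st.1, finish)) (insert, [])
        if st.2 ≠ [] then st.1 ++ [PySem.Chars.join [' '] st.2] else st.1) init
      = lines.foldl (fun acc raw =>
          let padded := raw.flatMap (fun ch => if ch ∈ pvSeps then [' ', ch, ' '] else [ch])
          let toks := (PySem.Chars.splitOn padded [' ']).filter (· ≠ [])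
          let st := toks.foldl
            (fun (st : List (List Char) × List Char) t =>
              let cur := if st.2 ≠ [] then st.2 ++ ' ' :: t else t
              if t = ['.'] ∨ t = ['!'] ∨ t = ['?'] then (st.1 ++ [cur], [])
              else (st.1, cur)) (acc, [])
          if st.2 ≠ [] then st.1 ++ [st.2] else st.1) init := by
    intro lines
    induction lines with
    | nil => intro init; rfl
    | cons l ls ih =>
      intro init
      simp only [List.foldl_cons]
      rw [← hline init l]
      exact ih _
  rw [hfold]
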